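-- pv_equiv track=rewrite | github.com/ZeeshanHaiderQadri/LingoLancers | backend/src/blog_team/agents/targeted_agent_methods.py | _extract_title_from_request
-- ===== SOURCE A (Python) =====
-- def _extract_title_from_request(title_request: str) -> str:
--     """Extract clean title from user request"""
--     # Remove common prefixes
--     title = title_request.strip()
--
--     # Remove phrases like "change title to", "new title:", etc.
--     prefixes_to_remove = [
--         "change title to",
--         "change the title to",
--         "update title to",
--         "update the title to",
--         "new title:",
--         "title:",
--         "make the title",
--         "title should be"
--     ]
--
--     title_lower = title.lower()
--     for prefix in prefixes_to_remove:
--         if title_lower.startswith(prefix):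
--             title = title[len(prefix):].strip()
--             break
--
--     # Remove quotes if present
--     if (title.startswith('"') and title.endswith('"')) or (title.startswith("'") and title.endswith("'")):
--         title = title[1:-1]
--
--     return title.strip()
-- ===== SOURCE B (Python) =====
-- # B: factored prefix tree (shared heads with tail alternatives) instead of a flat startswith loop.
-- _PREFIX_TREE = [
--     ("change ", ["title to", "the title to"]),
--     ("update ", ["title to", "the title to"]),
--     ("new ", ["title:"]),
--     ("title", [":", " should be"]),
--     ("make ", ["the title"]),
-- ]
--
--
-- def _prefix_len(low):
--     """Length of the request prefix to cut, 0 if none; heads are mutually exclusive."""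
--     for head, tails in _PREFIX_TREE:
--         if low.startswith(head):
--             rest = low[len(head):]
--             for tail in tails:
--                 if rest.startswith(tail):
--                     return len(head) + len(tail)
--             return 0
--     return 0
--
--
-- def _extract_title_from_request(title_request: str) -> str:
--     title = title_request.strip()
--     n = _prefix_len(title.lower())
--     if n != 0:
--         title = title[n:].strip()
--     if title and title[0] == title[-1] and title[0] in "\"'":
--         title = title[1:-1]
--     return title.strip()
-- ===== Notes on version B (the rewrite author's own statement) =====
-- stated objective: alternative
-- what changed: Replaces A's flat first-match startswith scan over eight full prefix strings by a two-level factored prefix tree (shared heads with tail alternatives), exploiting that the prefixes are mutually exclusive so match order is irrelevant.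
import Mathlib
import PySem

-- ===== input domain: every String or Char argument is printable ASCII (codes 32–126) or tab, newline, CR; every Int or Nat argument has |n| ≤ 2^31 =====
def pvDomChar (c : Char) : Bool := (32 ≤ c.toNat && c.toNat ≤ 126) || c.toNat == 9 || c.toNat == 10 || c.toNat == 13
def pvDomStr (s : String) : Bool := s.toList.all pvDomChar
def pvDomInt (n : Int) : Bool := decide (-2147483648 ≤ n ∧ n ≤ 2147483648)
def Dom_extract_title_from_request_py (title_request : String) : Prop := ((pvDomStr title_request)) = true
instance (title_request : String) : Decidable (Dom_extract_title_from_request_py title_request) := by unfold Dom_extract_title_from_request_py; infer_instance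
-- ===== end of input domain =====

-- B replaces A's flat first-match startswith loop by a factored two-level prefix tree
-- (shared heads, tail alternatives); same return value, alternative structure.

-- ===== PORT A =====
def pvPrefixesA : List String :=
  ["change title to", "change the title to", "update title to", "update the title to",
   "new title:", "title:", "make the title", "title should be"]

-- the 'for prefix in prefixes_to_remove' loop with its break; title is unchanged until the break
def pvLoopA (title_lower : String) (title : String) : List String → String
  | [] => title
  | p :: ps =>
    if PySem.Str.startswith title_lower p then
      PySem.Str.strip (PySem.Str.slice title (some (PySem.Str.len p)) none)
    else pvLoopA title_lower title ps

def extract_title_from_request_py (title_request : String) : String :=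
  let title := PySem.Str.strip title_request
  let title_lower := PySem.Str.lower title
  let title := pvLoopA title_lower title pvPrefixesA
  let title :=
    if (PySem.Str.startswith title "\"" && PySem.Str.endswith title "\"")
        || (PySem.Str.startswith title "'" && PySem.Str.endswith title "'") then
      PySem.Str.slice title (some 1) (some (-1))
    else title
  PySem.Str.strip title

-- ===== PORT B =====
def pvPrefixTree : List (String × List String) :=
  [("change ", ["title to", "the title to"]),
   ("update ", ["title to", "the title to"]),
   ("new ", ["title:"]),
   ("title", [":", " should be"]),
   ("make ", ["the title"])]

-- inner 'for tail in tails' loop of _prefix_len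
def pvTailLoop (rest : String) (headLen : Int) : List String → Int
  | [] => 0
  | t :: ts =>
    if PySem.Str.startswith rest t then headLen + PySem.Str.len t
    else pvTailLoop rest headLen ts

-- outer 'for head, tails in _PREFIX_TREE' loop of _prefix_len
def pvTreeLoop (low : String) : List (String × List String) → Int
  | [] => 0
  | (h, tails) :: rest =>
    if PySem.Str.startswith low h then
      pvTailLoop (PySem.Str.slice low (some (PySem.Str.len h)) none) (PySem.Str.len h) tails
    else pvTreeLoop low rest

def extract_title_from_request_py_alt (title_request : String) : String :=
  let title := PySem.Str.strip title_request
  let n := pvTreeLoop (PySem.Str.lower title) pvPrefixTree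
  let title := if n ≠ 0 then PySem.Str.strip (PySem.Str.slice title (some n) none) else title
  -- hand port of `title and title[0] == title[-1] and title[0] in "\"'"` (exact:
  -- title[0]/title[-1] raise only on "", where the truthiness test already gives False)
  let title :=
    if (match PySem.Str.pyGet? title 0, PySem.Str.pyGet? title (-1) with
        | some a, some b => a == b && (a == '"' || a == '\'')
        | _, _ => false) then
      PySem.Str.slice title (some 1) (some (-1))
    else title
  PySem.Str.strip title

-- ===== PRECONDITION & SPEC =====
def Spec_extract_title_from_request_py (title_request : String) (out : String) : Prop := out = extract_title_from_request_py_alt title_request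
instance (title_request : String) (out : String) : Decidable (Spec_extract_title_from_request_py title_request out) := by unfold Spec_extract_title_from_request_py; infer_instance

-- ===== CLAIM (what is proved, stated in full; the proofs are below) =====
def Claim_equal_extract_title_from_request_py : Prop := ∀ (title_request : String), Dom_extract_title_from_request_py title_request → Spec_extract_title_from_request_py title_request (extract_title_from_request_py title_request)

-- ===== LEMMAS AND PROOFS =====

theorem pv_prefix_append_iff (a b l : List Char) :
    a ++ b <+: l ↔ a <+: l ∧ b <+: l.drop a.length := by
  induction a generalizing l with
  | nil => simp
  | cons x xs ih =>
    cases l with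
    | nil => simp
    | cons y ys => simp [List.cons_prefix_cons, ih, and_assoc]

-- s.startswith(c) where c = a + b, phrased on the port's own terms
theorem pv_sw_split (low a b c : String) (h : a.toList ++ b.toList = c.toList) :
    PySem.Str.startswith low c =
      (PySem.Str.startswith low a &&
        PySem.Str.startswith (PySem.Str.slice low (some (PySem.Str.len a)) none) b) := by
  have hs : (PySem.Str.slice low (some (PySem.Str.len a)) none).toList
      = low.toList.drop a.toList.length := by
    rw [PySem.Str.toList_slice, PySem.Chars.slice_eq_listSlice, PySem.Str.len_eq,
      PySem.List.slice_from _ (by positivity)]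
    simp
  rw [Bool.eq_iff_iff]
  simp only [PySem.Str.startswith_eq, Bool.and_eq_true, PySem.Chars.startswith_iff, hs, ← h]
  exact pv_prefix_append_iff _ _ _

-- two incomparable prefixes cannot both match
theorem pv_sw_excl (low p q : String) (h1 : ¬ p.toList <+: q.toList)
    (h2 : ¬ q.toList <+: p.toList) (hp : PySem.Str.startswith low p = true) :
    PySem.Str.startswith low q = false := by
  rw [Bool.eq_false_iff]
  intro hq
  rw [PySem.Str.startswith_eq, PySem.Chars.startswith_iff] at hp hq
  rcases List.prefix_or_prefix_of_prefix hp hq with h | h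
  · exact h1 h
  · exact h2 h

theorem pv_sw_single (t q : String) (c : Char) (hq : q.toList = [c]) :
    PySem.Str.startswith t q = (t.toList.head? == some c) := by
  rw [Bool.eq_iff_iff]
  simp only [PySem.Str.startswith_eq, PySem.Chars.startswith_iff, hq, beq_iff_eq]
  cases t.toList with
  | nil => simp
  | cons x xs => simp [List.cons_prefix_cons, eq_comm]

theorem pv_suffix_single (c : Char) (l : List Char) : [c] <:+ l ↔ l.getLast? = some c := by
  rw [show [c] = [c].reverse from rfl, ← List.reverse_reverse l, List.reverse_suffix,
    List.reverse_reverse]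
  cases l using List.reverseRecOn with
  | nil => simp
  | append_singleton xs x => simp [List.cons_prefix_cons, eq_comm]

theorem pv_ew_single (t q : String) (c : Char) (hq : q.toList = [c]) :
    PySem.Str.endswith t q = (t.toList.getLast? == some c) := by
  rw [Bool.eq_iff_iff]
  simp only [PySem.Str.endswith_eq, PySem.Chars.endswith_iff, hq, beq_iff_eq]
  exact pv_suffix_single c t.toList

-- A's quote test equals B's quote test
theorem pv_quote_eq (t : String) :
    ((PySem.Str.startswith t "\"" && PySem.Str.endswith t "\"")
        || (PySem.Str.startswith t "'" && PySem.Str.endswith t "'"))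
      = (match PySem.Str.pyGet? t 0, PySem.Str.pyGet? t (-1) with
         | some a, some b => a == b && (a == '"' || a == '\'')
         | _, _ => false) := by
  have h0 : PySem.Str.pyGet? t 0 = t.toList.head? := by
    simp [PySem.List.pyGet?_zero, ← List.head?_eq_getElem?]
  have h1 : PySem.Str.pyGet? t (-1) = t.toList.getLast? := by
    simp [PySem.List.pyGet?_neg_one]
  rw [h0, h1, pv_sw_single t "\"" '"' (by decide), pv_ew_single t "\"" '"' (by decide),
    pv_sw_single t "'" '\'' (by decide), pv_ew_single t "'" '\'' (by decide)]
  cases hh : t.toList.head? with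
  | none =>
    cases t.toList.getLast? <;> simp
  | some x =>
    cases hg : t.toList.getLast? with
    | none =>
      exfalso
      cases hl : t.toList with
      | nil => rw [hl] at hh; simp at hh
      | cons y ys => rw [hl] at hg; simp at hg
    | some y =>
      rw [Bool.eq_iff_iff]
      simp only [Bool.or_eq_true, Bool.and_eq_true, beq_iff_eq, Option.some.injEq]
      constructor
      · rintro (⟨hx, hy⟩ | ⟨hx, hy⟩) <;> subst hx <;> subst hy <;> simp
      · rintro ⟨hxy, hx⟩
        subst hxy
        rcases hx with hx | hx <;> subst hx <;> simp

theorem pv_strip_slice_congr (t : String) (a b : Int) (h : a = b) :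
    PySem.Str.strip (PySem.Str.slice t (some a) none)
      = PySem.Str.strip (PySem.Str.slice t (some b) none) := by rw [h]

-- the central lemma: A's prefix loop = B's tree matcher, applied to the same title
theorem pv_cut_eq (low t : String) :
    pvLoopA low t pvPrefixesA =
      (if pvTreeLoop low pvPrefixTree ≠ 0 then
        PySem.Str.strip (PySem.Str.slice t (some (pvTreeLoop low pvPrefixTree)) none)
      else t) := by
  by_cases hc : PySem.Str.startswith low "change " = true
  · by_cases t1 : PySem.Str.startswith (PySem.Str.slice low (some (PySem.Str.len "change ")) none) "title to" = true
    · have e : pvTreeLoop low pvPrefixTree = 15 := by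
        simp only [pvTreeLoop, pvPrefixTree, pvTailLoop, hc, t1, if_true]; decide
      have p1 : PySem.Str.startswith low "change title to" = true := by
        rw [pv_sw_split low "change " "title to" _ (by decide), hc, t1]; rfl
      rw [e]
      simp only [pvLoopA, pvPrefixesA, p1, if_true]
      norm_num
      exact pv_strip_slice_congr t _ _ (by decide)
    · simp only [Bool.not_eq_true] at t1
      have p1 : PySem.Str.startswith low "change title to" = false := by
        rw [pv_sw_split low "change " "title to" _ (by decide), t1]; simp
      by_cases t2 : PySem.Str.startswith (PySem.Str.slice low (some (PySem.Str.len "change ")) none) "the title to" = true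
      · have e : pvTreeLoop low pvPrefixTree = 19 := by
          simp only [pvTreeLoop, pvPrefixTree, pvTailLoop, hc, t1, t2, if_true,
            Bool.false_eq_true, if_false]
          decide
        have p2 : PySem.Str.startswith low "change the title to" = true := by
          rw [pv_sw_split low "change " "the title to" _ (by decide), hc, t2]; rfl
        rw [e]
        simp only [pvLoopA, pvPrefixesA, p1, p2, if_true, Bool.false_eq_true, if_false]
        norm_num
        exact pv_strip_slice_congr t _ _ (by decide)
      · simp only [Bool.not_eq_true] at t2
        have e : pvTreeLoop low pvPrefixTree = 0 := by
          simp only [pvTreeLoop, pvPrefixTree, pvTailLoop, hc, t1, t2, if_true,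
            Bool.false_eq_true, if_false]
        have p2 : PySem.Str.startswith low "change the title to" = false := by
          rw [pv_sw_split low "change " "the title to" _ (by decide), t2]; simp
        have p3 := pv_sw_excl low "change " "update title to" (by decide) (by decide) hc
        have p4 := pv_sw_excl low "change " "update the title to" (by decide) (by decide) hc
        have p5 := pv_sw_excl low "change " "new title:" (by decide) (by decide) hc
        have p6 := pv_sw_excl low "change " "title:" (by decide) (by decide) hc
        have p7 := pv_sw_excl low "change " "make the title" (by decide) (by decide) hc
        have p8 := pv_sw_excl low "change " "title should be" (by decide) (by decide) hc
        rw [e]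
        simp only [pvLoopA, pvPrefixesA, p1, p2, p3, p4, p5, p6, p7, p8, Bool.false_eq_true, if_false]
        norm_num
  · simp only [Bool.not_eq_true] at hc
    have p1 : PySem.Str.startswith low "change title to" = false := by
      rw [pv_sw_split low "change " "title to" _ (by decide), hc]; simp
    have p2 : PySem.Str.startswith low "change the title to" = false := by
      rw [pv_sw_split low "change " "the title to" _ (by decide), hc]; simp
    by_cases hu : PySem.Str.startswith low "update " = true
    · by_cases t1 : PySem.Str.startswith (PySem.Str.slice low (some (PySem.Str.len "update ")) none) "title to" = true
      · have e : pvTreeLoop low pvPrefixTree = 15 := by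
          simp only [pvTreeLoop, pvPrefixTree, pvTailLoop, hc, hu, t1, if_true,
            Bool.false_eq_true, if_false]
          decide
        have p3 : PySem.Str.startswith low "update title to" = true := by
          rw [pv_sw_split low "update " "title to" _ (by decide), hu, t1]; rfl
        rw [e]
        simp only [pvLoopA, pvPrefixesA, p1, p2, p3, if_true, Bool.false_eq_true, if_false]
        norm_num
        exact pv_strip_slice_congr t _ _ (by decide)
      · simp only [Bool.not_eq_true] at t1
        have p3 : PySem.Str.startswith low "update title to" = false := by
          rw [pv_sw_split low "update " "title to" _ (by decide), t1]; simp
        by_cases t2 : PySem.Str.startswith (PySem.Str.slice low (some (PySem.Str.len "update ")) none) "the title to" = true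
        · have e : pvTreeLoop low pvPrefixTree = 19 := by
            simp only [pvTreeLoop, pvPrefixTree, pvTailLoop, hc, hu, t1, t2, if_true,
              Bool.false_eq_true, if_false]
            decide
          have p4 : PySem.Str.startswith low "update the title to" = true := by
            rw [pv_sw_split low "update " "the title to" _ (by decide), hu, t2]; rfl
          rw [e]
          simp only [pvLoopA, pvPrefixesA, p1, p2, p3, p4, if_true, Bool.false_eq_true, if_false]
          norm_num
          exact pv_strip_slice_congr t _ _ (by decide)
        · simp only [Bool.not_eq_true] at t2
          have e : pvTreeLoop low pvPrefixTree = 0 := by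
            simp only [pvTreeLoop, pvPrefixTree, pvTailLoop, hc, hu, t1, t2, if_true,
              Bool.false_eq_true, if_false]
          have p4 : PySem.Str.startswith low "update the title to" = false := by
            rw [pv_sw_split low "update " "the title to" _ (by decide), t2]; simp
          have p5 := pv_sw_excl low "update " "new title:" (by decide) (by decide) hu
          have p6 := pv_sw_excl low "update " "title:" (by decide) (by decide) hu
          have p7 := pv_sw_excl low "update " "make the title" (by decide) (by decide) hu
          have p8 := pv_sw_excl low "update " "title should be" (by decide) (by decide) hu
          rw [e]
          simp only [pvLoopA, pvPrefixesA, p1, p2, p3, p4, p5, p6, p7, p8, Bool.false_eq_true, if_false]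
          norm_num
    · simp only [Bool.not_eq_true] at hu
      have p3 : PySem.Str.startswith low "update title to" = false := by
        rw [pv_sw_split low "update " "title to" _ (by decide), hu]; simp
      have p4 : PySem.Str.startswith low "update the title to" = false := by
        rw [pv_sw_split low "update " "the title to" _ (by decide), hu]; simp
      by_cases hn : PySem.Str.startswith low "new " = true
      · by_cases t1 : PySem.Str.startswith (PySem.Str.slice low (some (PySem.Str.len "new ")) none) "title:" = true
        · have e : pvTreeLoop low pvPrefixTree = 10 := by
            simp only [pvTreeLoop, pvPrefixTree, pvTailLoop, hc, hu, hn, t1, if_true,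
              Bool.false_eq_true, if_false]
            decide
          have p5 : PySem.Str.startswith low "new title:" = true := by
            rw [pv_sw_split low "new " "title:" _ (by decide), hn, t1]; rfl
          rw [e]
          simp only [pvLoopA, pvPrefixesA, p1, p2, p3, p4, p5, if_true, Bool.false_eq_true, if_false]
          norm_num
          exact pv_strip_slice_congr t _ _ (by decide)
        · simp only [Bool.not_eq_true] at t1
          have e : pvTreeLoop low pvPrefixTree = 0 := by
            simp only [pvTreeLoop, pvPrefixTree, pvTailLoop, hc, hu, hn, t1, if_true,
              Bool.false_eq_true, if_false]
          have p5 : PySem.Str.startswith low "new title:" = false := by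
            rw [pv_sw_split low "new " "title:" _ (by decide), t1]; simp
          have p6 := pv_sw_excl low "new " "title:" (by decide) (by decide) hn
          have p7 := pv_sw_excl low "new " "make the title" (by decide) (by decide) hn
          have p8 := pv_sw_excl low "new " "title should be" (by decide) (by decide) hn
          rw [e]
          simp only [pvLoopA, pvPrefixesA, p1, p2, p3, p4, p5, p6, p7, p8, Bool.false_eq_true, if_false]
          norm_num
      · simp only [Bool.not_eq_true] at hn
        have p5 : PySem.Str.startswith low "new title:" = false := by
          rw [pv_sw_split low "new " "title:" _ (by decide), hn]; simp
        by_cases ht : PySem.Str.startswith low "title" = true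
        · have p7 := pv_sw_excl low "title" "make the title" (by decide) (by decide) ht
          by_cases t1 : PySem.Str.startswith (PySem.Str.slice low (some (PySem.Str.len "title")) none) ":" = true
          · have e : pvTreeLoop low pvPrefixTree = 6 := by
              simp only [pvTreeLoop, pvPrefixTree, pvTailLoop, hc, hu, hn, ht, t1, if_true,
                Bool.false_eq_true, if_false]
              decide
            have p6 : PySem.Str.startswith low "title:" = true := by
              rw [pv_sw_split low "title" ":" _ (by decide), ht, t1]; rfl
            rw [e]
            simp only [pvLoopA, pvPrefixesA, p1, p2, p3, p4, p5, p6, if_true,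
              Bool.false_eq_true, if_false]
            norm_num
            exact pv_strip_slice_congr t _ _ (by decide)
          · simp only [Bool.not_eq_true] at t1
            have p6 : PySem.Str.startswith low "title:" = false := by
              rw [pv_sw_split low "title" ":" _ (by decide), t1]; simp
            by_cases t2 : PySem.Str.startswith (PySem.Str.slice low (some (PySem.Str.len "title")) none) " should be" = true
            · have e : pvTreeLoop low pvPrefixTree = 15 := by
                simp only [pvTreeLoop, pvPrefixTree, pvTailLoop, hc, hu, hn, ht, t1, t2, if_true,
                  Bool.false_eq_true, if_false]
                decide
              have p8 : PySem.Str.startswith low "title should be" = true := by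
                rw [pv_sw_split low "title" " should be" _ (by decide), ht, t2]; rfl
              rw [e]
              simp only [pvLoopA, pvPrefixesA, p1, p2, p3, p4, p5, p6, p7, p8, if_true,
                Bool.false_eq_true, if_false]
              norm_num
              exact pv_strip_slice_congr t _ _ (by decide)
            · simp only [Bool.not_eq_true] at t2
              have e : pvTreeLoop low pvPrefixTree = 0 := by
                simp only [pvTreeLoop, pvPrefixTree, pvTailLoop, hc, hu, hn, ht, t1, t2, if_true,
                  Bool.false_eq_true, if_false]
              have p8 : PySem.Str.startswith low "title should be" = false := by
                rw [pv_sw_split low "title" " should be" _ (by decide), t2]; simp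
              rw [e]
              simp only [pvLoopA, pvPrefixesA, p1, p2, p3, p4, p5, p6, p7, p8, Bool.false_eq_true, if_false]
              norm_num
        · simp only [Bool.not_eq_true] at ht
          have p6 : PySem.Str.startswith low "title:" = false := by
            rw [pv_sw_split low "title" ":" _ (by decide), ht]; simp
          have p8 : PySem.Str.startswith low "title should be" = false := by
            rw [pv_sw_split low "title" " should be" _ (by decide), ht]; simp
          by_cases hm : PySem.Str.startswith low "make " = true
          · by_cases t1 : PySem.Str.startswith (PySem.Str.slice low (some (PySem.Str.len "make ")) none) "the title" = true
            · have e : pvTreeLoop low pvPrefixTree = 14 := by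
                simp only [pvTreeLoop, pvPrefixTree, pvTailLoop, hc, hu, hn, ht, hm, t1, if_true,
                  Bool.false_eq_true, if_false]
                decide
              have p7 : PySem.Str.startswith low "make the title" = true := by
                rw [pv_sw_split low "make " "the title" _ (by decide), hm, t1]; rfl
              rw [e]
              simp only [pvLoopA, pvPrefixesA, p1, p2, p3, p4, p5, p6, p7, if_true,
                Bool.false_eq_true, if_false]
              norm_num
              exact pv_strip_slice_congr t _ _ (by decide)
            · simp only [Bool.not_eq_true] at t1
              have e : pvTreeLoop low pvPrefixTree = 0 := by
                simp only [pvTreeLoop, pvPrefixTree, pvTailLoop, hc, hu, hn, ht, hm, t1, if_true,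
                  Bool.false_eq_true, if_false]
              have p7 : PySem.Str.startswith low "make the title" = false := by
                rw [pv_sw_split low "make " "the title" _ (by decide), t1]; simp
              rw [e]
              simp only [pvLoopA, pvPrefixesA, p1, p2, p3, p4, p5, p6, p7, p8, Bool.false_eq_true, if_false]
              norm_num
          · simp only [Bool.not_eq_true] at hm
            have p7 : PySem.Str.startswith low "make the title" = false := by
              rw [pv_sw_split low "make " "the title" _ (by decide), hm]; simp
            have e : pvTreeLoop low pvPrefixTree = 0 := by
              simp only [pvTreeLoop, pvPrefixTree, hc, hu, hn, ht, hm,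
                Bool.false_eq_true, if_false]
            rw [e]
            simp only [pvLoopA, pvPrefixesA, p1, p2, p3, p4, p5, p6, p7, p8, Bool.false_eq_true, if_false]
            norm_num

-- ===== VERDICT (by name: the statement is the Claim_ definition above) =====
theorem extract_title_from_request_py_spec : Claim_equal_extract_title_from_request_py := by
  intro tr _
  show extract_title_from_request_py tr = extract_title_from_request_py_alt tr
  unfold extract_title_from_request_py extract_title_from_request_py_alt
  simp only []
  rw [pv_cut_eq, pv_quote_eq]
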